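-- pv_equiv track=rewrite | github.com/w4zir/BitBot | backend/rag/required_fields.py | build_missing_prompts
-- ===== SOURCE A (Python) =====
-- from typing import Any, Optional
--
-- def build_missing_prompts(spec: dict[str, Any], missing_names: list[str]) -> str:
--     """Compose user-facing prompts for missing required fields."""
--     required = spec.get("required_fields") or []
--     if not isinstance(required, list):
--         return ""
--     name_to_prompt: dict[str, str] = {}
--     for item in required:
--         if not isinstance(item, dict):
--             continue
--         n = item.get("name")
--         pr = item.get("prompt")
--         if isinstance(n, str) and isinstance(pr, str):
--             name_to_prompt[n.lower()] = pr
--     lines: list[str] = []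
--     for m in missing_names:
--         p = name_to_prompt.get(m.lower())
--         if p:
--             lines.append(p)
--     if not lines and missing_names:
--         return "Please provide the missing details so we can help."
--     return "\n".join(lines)
-- ===== SOURCE B (Python) =====
-- from typing import Any
--
-- def build_missing_prompts(spec: dict[str, Any], missing_names: list[str]) -> str:
--     """Compose user-facing prompts for missing required fields."""
--     required = spec.get("required_fields") or []
--     if not isinstance(required, list):
--         return ""
--     lines: list[str] = []
--     for m in missing_names:
--         key = m.lower()
--         for item in required:
--             if not isinstance(item, dict):
--                 continue
--             n = item.get("name")
--             pr = item.get("prompt")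
--             if isinstance(n, str) and isinstance(pr, str) and n.lower() == key:
--                 if pr:
--                     lines.append(pr)
--                 break
--     if not lines and missing_names:
--         return "Please provide the missing details so we can help."
--     return "\n".join(lines)
-- ===== Notes on version B (the rewrite author's own statement) =====
-- stated objective: simpler
-- what changed: B drops the name->prompt dictionary entirely and, per missing name, scans the required list for the first matching entry; Pre_ excludes specs whose required_fields contain two qualifying entries with the same lowercased name, where A's dict-overwrite winner (last entry) is accidental and B's first match is equally defensible.
import Mathlib
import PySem

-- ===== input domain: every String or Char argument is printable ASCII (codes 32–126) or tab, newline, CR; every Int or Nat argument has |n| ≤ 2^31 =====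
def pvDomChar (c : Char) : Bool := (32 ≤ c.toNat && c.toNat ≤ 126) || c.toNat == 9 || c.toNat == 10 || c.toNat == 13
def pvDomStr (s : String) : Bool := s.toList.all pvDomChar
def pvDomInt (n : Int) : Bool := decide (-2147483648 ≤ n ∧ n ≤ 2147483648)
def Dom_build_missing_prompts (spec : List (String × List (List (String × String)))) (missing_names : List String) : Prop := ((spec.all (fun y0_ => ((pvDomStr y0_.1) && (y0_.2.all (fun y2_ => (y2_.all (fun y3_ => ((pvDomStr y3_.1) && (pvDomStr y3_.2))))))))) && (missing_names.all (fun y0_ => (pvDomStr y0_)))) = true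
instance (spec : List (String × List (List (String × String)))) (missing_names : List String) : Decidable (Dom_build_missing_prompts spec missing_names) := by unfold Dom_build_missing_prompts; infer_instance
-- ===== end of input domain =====

-- B composes the prompts without building the name->prompt dictionary: for each missing
-- name it scans the required list for the first matching entry (objective: simpler).

-- ===== PORT A =====
def build_missing_prompts (spec : List (String × List (List (String × String)))) (missing_names : List String) : String :=
  -- required = spec.get("required_fields") or []   ('or []' turns a falsy (empty) list into [])
  let required : List (List (String × String)) :=
    match (PySem.Dict.mk spec).get? "required_fields" with
    | some l => if l = [] then [] else l
    | none => []
  -- 'isinstance(required, list)' always holds under the declared type; items are dicts, so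
  -- 'isinstance(item, dict)' always holds and 'isinstance(n/pr, str)' is 'Option.isSome'.
  let name_to_prompt : PySem.Dict String String :=
    required.foldl (fun d item =>
      match (PySem.Dict.mk item).get? "name", (PySem.Dict.mk item).get? "prompt" with
      | some n, some pr => d.insert (PySem.Str.lower n) pr
      | _, _ => d) PySem.Dict.empty
  let lines : List String :=
    missing_names.foldl (fun ls m =>
      match name_to_prompt.get? (PySem.Str.lower m) with
      | some p => if p = "" then ls else ls ++ [p]   -- 'if p:' — truthy string
      | none => ls) []
  if lines = [] && !(missing_names = []) then
    "Please provide the missing details so we can help."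
  else PySem.Str.join "\n" lines

-- ===== PORT B =====
-- inner for-loop of Source B with its 'break': the FIRST item whose lowered name matches
def pvFirstPrompt (required : List (List (String × String))) (key : String) : Option String :=
  match required with
  | [] => none
  | item :: rest =>
    match (PySem.Dict.mk item).get? "name" with
    | none => pvFirstPrompt rest key
    | some n =>
      match (PySem.Dict.mk item).get? "prompt" with
      | none => pvFirstPrompt rest key
      | some pr => if PySem.Str.lower n = key then some pr else pvFirstPrompt rest key

def build_missing_prompts_alt (spec : List (String × List (List (String × String)))) (missing_names : List String) : String :=
  let required : List (List (String × String)) :=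
    match (PySem.Dict.mk spec).get? "required_fields" with
    | some l => if l = [] then [] else l
    | none => []
  let lines : List String :=
    missing_names.foldl (fun ls m =>
      match pvFirstPrompt required (PySem.Str.lower m) with
      | some pr => if pr = "" then ls else ls ++ [pr]   -- 'if pr:' — truthy string
      | none => ls) []
  if lines = [] && !(missing_names = []) then
    "Please provide the missing details so we can help."
  else PySem.Str.join "\n" lines

-- ===== PRECONDITION & SPEC =====
-- lowered names of the qualifying entries (dicts with string 'name' and 'prompt')
def pvKeys (required : List (List (String × String))) : List String :=
  required.filterMap (fun item =>
    match (PySem.Dict.mk item).get? "name" with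
    | none => none
    | some n =>
      match (PySem.Dict.mk item).get? "prompt" with
      | none => none
      | some _ => some (PySem.Str.lower n))

-- Pre_ excludes specs whose required_fields contain two qualifying entries with the same
-- lowercased name: which entry's prompt wins there is an accident of A's dict-overwrite
-- order, and B's first-match choice is equally defensible on that unspecified corner.
def Pre_build_missing_prompts (spec : List (String × List (List (String × String)))) (missing_names : List String) : Prop :=
  (pvKeys (((PySem.Dict.mk spec).get? "required_fields").getD [])).Nodup
instance (spec : List (String × List (List (String × String)))) (missing_names : List String) : Decidable (Pre_build_missing_prompts spec missing_names) := by unfold Pre_build_missing_prompts; infer_instance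

def pvWitness_build_missing_prompts : (List (String × List (List (String × String)))) × List String :=
  ([("required_fields", [[("name", "City"), ("prompt", "Which city?")], [("name", "date"), ("prompt", "")]])], ["city", "x"])

def Spec_build_missing_prompts (spec : List (String × List (List (String × String)))) (missing_names : List String) (out : String) : Prop := out = build_missing_prompts_alt spec missing_names
instance (spec : List (String × List (List (String × String)))) (missing_names : List String) (out : String) : Decidable (Spec_build_missing_prompts spec missing_names out) := by unfold Spec_build_missing_prompts; infer_instance

-- ===== CLAIM =====
def Claim_equal_build_missing_prompts : Prop := ∀ (spec : List (String × List (List (String × String)))) (missing_names : List String), Dom_build_missing_prompts spec missing_names → Pre_build_missing_prompts spec missing_names → Spec_build_missing_prompts spec missing_names (build_missing_prompts spec missing_names)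

-- ===== LEMMAS AND PROOFS =====

-- looking up a key in the dict A folds up equals a last-match scan from the initial value
theorem pvDict_fold_get (required : List (List (String × String))) (key : String) :
    ∀ (d0 : PySem.Dict String String),
      (required.foldl (fun d item =>
        match (PySem.Dict.mk item).get? "name", (PySem.Dict.mk item).get? "prompt" with
        | some n, some pr => d.insert (PySem.Str.lower n) pr
        | _, _ => d) d0).get? key
      = required.foldl (fun p item =>
        match (PySem.Dict.mk item).get? "name", (PySem.Dict.mk item).get? "prompt" with
        | some n, some pr => if PySem.Str.lower n = key then some pr else p
        | _, _ => p) (d0.get? key) := by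
  induction required with
  | nil => intro d0; rfl
  | cons item rest ih =>
    intro d0
    simp only [List.foldl_cons]
    cases hn : (PySem.Dict.mk item).get? "name" with
    | none => exact ih d0
    | some n =>
      cases hp : (PySem.Dict.mk item).get? "prompt" with
      | none => exact ih d0
      | some pr =>
        simp only
        rw [ih]
        by_cases h : PySem.Str.lower n = key
        · rw [if_pos h, h, PySem.Dict.get?_insert_self]
        · rw [if_neg h, PySem.Dict.get?_insert_of_ne _ _ (fun hk => h hk.symm)]

-- when key is absent from the qualifying names, the last-match scan keeps its seed
theorem pvLast_notmem (required : List (List (String × String))) (key : String)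
    (h : key ∉ pvKeys required) (p : Option String) :
    required.foldl (fun p item =>
      match (PySem.Dict.mk item).get? "name", (PySem.Dict.mk item).get? "prompt" with
      | some n, some pr => if PySem.Str.lower n = key then some pr else p
      | _, _ => p) p = p := by
  induction required generalizing p with
  | nil => rfl
  | cons item rest ih =>
    simp only [pvKeys, List.filterMap_cons] at h
    simp only [List.foldl_cons]
    cases hn : (PySem.Dict.mk item).get? "name" with
    | none => simp only [hn] at h ⊢; exact ih h p
    | some n =>
      cases hp : (PySem.Dict.mk item).get? "prompt" with
      | none => simp only [hn, hp] at h ⊢; exact ih h p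
      | some pr =>
        simp only [hn, hp, List.mem_cons, not_or] at h ⊢
        rw [if_neg (fun he => h.1 he.symm)]
        exact ih h.2 p

-- with no duplicate qualifying names, last match = first match
theorem pvLast_eq_first (required : List (List (String × String))) (key : String)
    (hnd : (pvKeys required).Nodup) :
    required.foldl (fun p item =>
      match (PySem.Dict.mk item).get? "name", (PySem.Dict.mk item).get? "prompt" with
      | some n, some pr => if PySem.Str.lower n = key then some pr else p
      | _, _ => p) none = pvFirstPrompt required key := by
  induction required with
  | nil => rfl
  | cons item rest ih =>
    simp only [pvKeys, List.filterMap_cons] at hnd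
    simp only [List.foldl_cons, pvFirstPrompt]
    cases hn : (PySem.Dict.mk item).get? "name" with
    | none => simp only [hn] at hnd ⊢; exact ih hnd
    | some n =>
      cases hp : (PySem.Dict.mk item).get? "prompt" with
      | none => simp only [hn, hp] at hnd ⊢; exact ih hnd
      | some pr =>
        simp only [hn, hp, List.nodup_cons] at hnd ⊢
        by_cases h : PySem.Str.lower n = key
        · rw [if_pos h, if_pos h]
          exact pvLast_notmem rest key (h ▸ hnd.1) (some pr)
        · rw [if_neg h, if_neg h]
          exact ih hnd.2

theorem pvLines_eq (req : List (List (String × String))) (ms : List String)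
    (hnd : (pvKeys req).Nodup) :
    ms.foldl (fun ls m =>
      match (req.foldl (fun d item =>
        match (PySem.Dict.mk item).get? "name", (PySem.Dict.mk item).get? "prompt" with
        | some n, some pr => d.insert (PySem.Str.lower n) pr
        | _, _ => d) PySem.Dict.empty).get? (PySem.Str.lower m) with
      | some p => if p = "" then ls else ls ++ [p]
      | none => ls) []
    = ms.foldl (fun ls m =>
      match pvFirstPrompt req (PySem.Str.lower m) with
      | some pr => if pr = "" then ls else ls ++ [pr]
      | none => ls) [] := by
  apply PySem.List.foldl_congr_mem
  intro ls m _
  rw [pvDict_fold_get]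
  have : (PySem.Dict.empty : PySem.Dict String String).get? (PySem.Str.lower m) = none := rfl
  rw [this, pvLast_eq_first req (PySem.Str.lower m) hnd]

-- ===== VERDICT =====
theorem build_missing_prompts_spec : Claim_equal_build_missing_prompts := by
  intro spec missing_names _ hpre
  unfold Spec_build_missing_prompts
  unfold Pre_build_missing_prompts at hpre
  simp only [build_missing_prompts, build_missing_prompts_alt]
  have hr : (match (PySem.Dict.mk spec).get? "required_fields" with
      | some l => if l = [] then [] else l
      | none => ([] : List (List (String × String))))
      = ((PySem.Dict.mk spec).get? "required_fields").getD [] := by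
    cases (PySem.Dict.mk spec).get? "required_fields" with
    | none => rfl
    | some l => by_cases hl : l = [] <;> simp [hl]
  rw [hr, pvLines_eq _ _ hpre]
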